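-- pv_equiv track=rewrite | github.com/Benjamin-van-Heerden/Python | google_foobar/level5/five.py | generate_subproblems
-- ===== SOURCE A (Python) =====
-- from math import factorial, perm, pow, comb
--
-- def find_cardinality(partition, num_colors):
--     full_length = len(partition)
--     truncated_length = len(set(partition))
--     if full_length == truncated_length:
--         return perm(num_colors, full_length)
--     else:
--         counts = {}
--         for n in partition:
--             if n in counts:
--                 counts[n] += 1
--             else:
--                 counts[n] = 1
--
--         temp_total = num_colors
--         result = 1
--         for val in counts.values():
--             result *= comb(temp_total, val)
--             temp_total -= val
--         return result
--
-- def generate_subproblems(total_nodes, colors):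
--     all_partitions = [0 for i in range(colors)]
--     k = 1
--     all_partitions[0] = 0
--     all_partitions[1] = total_nodes
--     while k != 0:
--         x = all_partitions[k - 1] + 1
--         y = all_partitions[k] - 1
--         k -= 1
--         while x <= y and k < colors - 1:
--             all_partitions[k] = x
--             y -= x
--             k += 1
--         all_partitions[k] = x + y
--
--         current_partition = all_partitions[:k + 1]
--         cardinality = find_cardinality(current_partition, colors)
--         yield current_partition, cardinality
-- ===== SOURCE B (Python) =====
-- # B: recursive ascending-partition generator (smallest-part-first) instead of
-- # AccelAsc's iterative in-place array; find_cardinality kept as in A.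
-- from math import factorial, perm, pow, comb
--
--
-- def find_cardinality(partition, num_colors):
--     full_length = len(partition)
--     truncated_length = len(set(partition))
--     if full_length == truncated_length:
--         return perm(num_colors, full_length)
--     else:
--         counts = {}
--         for n in partition:
--             if n in counts:
--                 counts[n] += 1
--             else:
--                 counts[n] = 1
--
--         temp_total = num_colors
--         result = 1
--         for val in counts.values():
--             result *= comb(temp_total, val)
--             temp_total -= val
--         return result
--
--
-- def _parts(n, max_parts, min_part):
--     # all ascending partitions of n into at most max_parts parts, each >= min_part,
--     # in lexicographic order
--     if max_parts <= 1:
--         yield [n]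
--         return
--     f = min_part
--     while 2 * f <= n:
--         for rest in _parts(n - f, max_parts - 1, f):
--             yield [f] + rest
--         f += 1
--     yield [n]
--
--
-- def generate_subproblems(total_nodes, colors):
--     for p in _parts(total_nodes, colors, 1):
--         yield p, find_cardinality(p, colors)
-- ===== Notes on version B (the rewrite author's own statement) =====
-- stated objective: alternative
-- what changed: Replaces AccelAsc's iterative in-place array walk (mutable all_partitions plus index k) by a recursive generator that yields the ascending partitions of n into at most `colors` parts directly, smallest part first; find_cardinality is kept verbatim.
import Mathlib
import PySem

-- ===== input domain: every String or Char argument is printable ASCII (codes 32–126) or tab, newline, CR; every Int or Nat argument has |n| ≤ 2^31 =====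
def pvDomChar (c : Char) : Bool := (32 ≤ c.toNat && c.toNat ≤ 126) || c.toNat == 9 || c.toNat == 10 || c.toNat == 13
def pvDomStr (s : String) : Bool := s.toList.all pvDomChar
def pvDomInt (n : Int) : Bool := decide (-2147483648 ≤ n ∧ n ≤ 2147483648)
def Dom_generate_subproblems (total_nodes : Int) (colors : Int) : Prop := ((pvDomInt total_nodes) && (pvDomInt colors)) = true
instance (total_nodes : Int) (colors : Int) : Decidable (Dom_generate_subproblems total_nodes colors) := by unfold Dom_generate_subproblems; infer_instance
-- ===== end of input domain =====

-- B replaces AccelAsc's iterative in-place array walk by a recursive ascending-partition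
-- generator (same outputs, same order); find_cardinality is kept verbatim, so both ports
-- share its port `findCard`.

-- ===== PORT A =====

-- port of find_cardinality (Source B keeps this helper verbatim, so both ports call it).
-- math.perm(n, k) = Nat.descFactorial, math.comb(n, k) = Nat.choose; exact for the
-- nonnegative arguments that occur under Pre_ (colors ≥ 2, counts ≤ colors).
def findCard (partition : List Int) (num_colors : Int) : Int :=
  let full_length := partition.length
  let truncated_length := (PySem.Set.ofList partition).length
  if full_length = truncated_length then
    ((num_colors.toNat).descFactorial full_length : Int)
  else
    let counts : PySem.Dict Int Int :=
      partition.foldl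
        (fun d n => if d.contains n then d.modify n 0 (· + 1) else d.insert n 1)
        PySem.Dict.empty
    (counts.values.foldl
      (fun (st : Int × Int) val => (st.1 - val, st.2 * (Nat.choose st.1.toNat val.toNat : Int)))
      (num_colors, 1)).2

-- A's inner while loop: `while x <= y and k < colors - 1: a[k] = x; y -= x; k += 1`,
-- then `a[k] = x + y`; returned as the list of cells written from index j = k-1 on.
def innerA (colors : Int) (x y j : Int) : List Int :=
  if x ≤ y ∧ j < colors - 1 then x :: innerA colors x (y - x) (j + 1)
  else [x + y]
termination_by (colors - 1 - j).toNat
decreasing_by omega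

-- A's outer `while k != 0` loop.  The array a (length colors) is modelled by its live
-- prefix s = a[:k+1]: cells beyond index k are never read before being overwritten.
-- fuel is a guard making the loop total; it is proved sufficient below.
def loopA (colors : Int) : Nat → List Int → List (List Int × Int)
  | 0, _ => []
  | fuel + 1, s =>
    if s.length < 2 then []            -- k = 0: the while loop exits
    else
      let q := s.dropLast.dropLast
      let u := s.dropLast.getLastD 0   -- all_partitions[k - 1]
      let v := s.getLastD 0            -- all_partitions[k]
      let s' := q ++ innerA colors (u + 1) (v - 1) (q.length : Int)
      (s', findCard s' colors) :: loopA colors fuel s'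

def generate_subproblems (total_nodes : Int) (colors : Int) : List (List Int × Int) :=
  -- initial state: a[0] = 0, a[1] = total_nodes, k = 1
  loopA colors (2 ^ total_nodes.toNat + 2) [0, total_nodes]

-- ===== PORT B =====

-- B's recursive generator _parts(n, max_parts, min_part); the `while 2*f <= n` loop is
-- the recursion on f.
def partsB (maxp : Nat) (n f : Int) : List (List Int) :=
  if maxp ≤ 1 then [[n]]
  else if 2 * f ≤ n then
    (partsB (maxp - 1) (n - f) f).map (f :: ·) ++ partsB maxp n (f + 1)
  else [[n]]
termination_by (maxp, (n + 1 - 2 * f).toNat)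
decreasing_by
  · exact Prod.Lex.left _ _ (by omega)
  · exact Prod.Lex.right _ (by omega)

def generate_subproblems_alt (total_nodes : Int) (colors : Int) : List (List Int × Int) :=
  (partsB colors.toNat total_nodes 1).map (fun p => (p, findCard p colors))

-- ===== PRECONDITION & SPEC =====
-- Python A raises IndexError whenever colors <= 1 (the write all_partitions[1] = total_nodes,
-- or all_partitions[0] = 0 for colors <= 0); Pre_ excludes exactly those inputs.
def Pre_generate_subproblems (_total_nodes : Int) (colors : Int) : Prop := 2 ≤ colors
instance (total_nodes : Int) (colors : Int) : Decidable (Pre_generate_subproblems total_nodes colors) := by unfold Pre_generate_subproblems; infer_instance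

def pvWitness_generate_subproblems : Int × Int := (5, 3)

def Spec_generate_subproblems (total_nodes : Int) (colors : Int) (out : List (List Int × Int)) : Prop := out = generate_subproblems_alt total_nodes colors
instance (total_nodes : Int) (colors : Int) (out : List (List Int × Int)) : Decidable (Spec_generate_subproblems total_nodes colors out) := by unfold Spec_generate_subproblems; infer_instance

-- ===== CLAIM (what is proved, stated in full; the proofs are below) =====
def Claim_equal_generate_subproblems : Prop := ∀ (total_nodes : Int) (colors : Int), Dom_generate_subproblems total_nodes colors → Pre_generate_subproblems total_nodes colors → Spec_generate_subproblems total_nodes colors (generate_subproblems total_nodes colors)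


-- ===== LEMMAS AND PROOFS =====

-- remaining output of A's loop from live state s, read back to front:
-- restR colors (v :: u :: t) is the output from state t.reverse ++ [u, v].
def restR (colors : Int) : List Int → List (List Int × Int)
  | v :: u :: t =>
      (partsB (colors - t.length).toNat (u + v) (u + 1)).map
        (fun p => (t.reverse ++ p, findCard (t.reverse ++ p) colors))
      ++ restR colors ((u + v) :: t)
  | _ => []
termination_by l => l.length
decreasing_by simp

lemma partsB_ne_nil (maxp : Nat) (n f : Int) : partsB maxp n f ≠ [] := by
  fun_induction partsB maxp n f with
  | case1 maxp n f h => simp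
  | case2 maxp n f h1 h2 ih1 ih2 => simp [ih1]
  | case3 maxp n f h1 h2 => simp

lemma innerA_ne_nil (colors x y j : Int) : innerA colors x y j ≠ [] := by
  unfold innerA; split <;> simp

lemma partsB_len (maxp : Nat) (n f : Int) : 1 ≤ f →
    (partsB maxp n f).length ≤ 2 ^ (n + 1 - 2 * f).toNat := by
  fun_induction partsB maxp n f with
  | case1 maxp n f h => intro _; simpa using Nat.one_le_two_pow
  | case2 maxp n f h1 h2 ih1' ih2' =>
      intro hf
      have ih1 := ih1' hf
      have ih2 := ih2' (by omega)
      rw [List.length_append, List.length_map]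
      have e1 : (n - f + 1 - 2 * f).toNat ≤ (n + 1 - 2 * f).toNat - 1 := by omega
      have e2 : (n + 1 - 2 * (f + 1)).toNat ≤ (n + 1 - 2 * f).toNat - 1 := by omega
      have ha : 1 ≤ (n + 1 - 2 * f).toNat := by omega
      calc (partsB (maxp - 1) (n - f) f).length + (partsB maxp n (f + 1)).length
          ≤ 2 ^ ((n + 1 - 2 * f).toNat - 1) + 2 ^ ((n + 1 - 2 * f).toNat - 1) := by
            gcongr <;> [exact le_trans ih1 (Nat.pow_le_pow_right (by norm_num) e1);
                        exact le_trans ih2 (Nat.pow_le_pow_right (by norm_num) e2)]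
        _ = 2 ^ ((n + 1 - 2 * f).toNat - 1 + 1) := by ring
        _ ≤ 2 ^ (n + 1 - 2 * f).toNat := Nat.pow_le_pow_right (by norm_num) (by omega)
  | case3 maxp n f h1 h2 => intro _; simpa using Nat.one_le_two_pow

-- the key step: one iteration of A's outer loop peels exactly the head of restR.
lemma step_eq (colors : Int) (mp : Nat) :
    ∀ (q : List Int) (u v : Int), mp = (colors - q.length).toNat →
    restR colors (v :: u :: q.reverse)
      = (q ++ innerA colors (u + 1) (v - 1) (q.length : Int),
         findCard (q ++ innerA colors (u + 1) (v - 1) (q.length : Int)) colors)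
        :: restR colors ((q ++ innerA colors (u + 1) (v - 1) (q.length : Int)).reverse) := by
  induction mp with
  | zero =>
    intro q u v h
    have hcap : colors - (q.length : Int) ≤ 0 := by omega
    have hG : innerA colors (u + 1) (v - 1) (q.length : Int) = [u + v] := by
      unfold innerA; rw [if_neg (by omega)]; congr 1; ring
    have hp : partsB 0 (u + v) (u + 1) = [[u + v]] := by
      unfold partsB; rw [if_pos (by omega)]
    simp only [restR, hG, List.length_reverse, List.reverse_reverse, List.reverse_append,
      List.reverse_cons, List.reverse_nil, List.nil_append]
    rw [← h, hp]
    simp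
  | succ mp ih =>
    intro q u v h
    by_cases hone : mp = 0
    · subst hone
      have hG : innerA colors (u + 1) (v - 1) (q.length : Int) = [u + v] := by
        unfold innerA; rw [if_neg (by omega)]; congr 1; ring
      have hp : partsB 1 (u + v) (u + 1) = [[u + v]] := by
        unfold partsB; rw [if_pos (by omega)]
      simp only [restR, hG, List.length_reverse, List.reverse_reverse, List.reverse_append,
        List.reverse_cons, List.reverse_nil, List.nil_append]
      rw [← h, hp]
      simp
    · -- mp + 1 ≥ 2
      by_cases hs : 2 * (u + 1) ≤ u + v
      · -- split case
        have e2 : v - 1 - (u + 1) = v - u - 2 := by ring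
        have hG : innerA colors (u + 1) (v - 1) (q.length : Int)
            = (u + 1) :: innerA colors (u + 1) (v - u - 2) ((q.length : Int) + 1) := by
          conv_lhs => rw [innerA.eq_def]
          rw [if_pos ⟨by omega, by omega⟩, e2]
        have hp : partsB (mp + 1) (u + v) (u + 1)
            = (partsB mp (v - 1) (u + 1)).map ((u + 1) :: ·) ++ partsB (mp + 1) (u + v) (u + 1 + 1) := by
          conv_lhs => rw [partsB.eq_def]
          rw [if_neg (by omega), if_pos (by omega)]
          have e1 : u + v - (u + 1) = v - 1 := by ring
          rw [e1]; simp
        have hih := ih (q ++ [u + 1]) u (v - u - 1) (by simp; omega)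
        have eArg : u + (v - u - 1) = v - 1 := by ring
        have eArg2 : v - u - 1 - 1 = v - u - 2 := by ring
        have eA : u + 1 + (v - 1) = u + v := by ring
        have eMp : (colors - ((q.length : Int) + 1)).toNat = mp := by omega
        simp only [restR, List.reverse_append, List.reverse_cons, List.reverse_nil,
          List.nil_append, List.cons_append, List.length_cons, List.length_reverse,
          List.reverse_reverse, List.length_append, List.length_nil, Nat.zero_add,
          Nat.cast_add, Nat.cast_one, List.append_assoc, eArg, eArg2, eA, eMp] at hih
        rw [← h] at hih
        -- unfold goal's restR and normalize the same way
        simp only [restR, List.length_reverse, List.reverse_reverse, List.reverse_append,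
          List.reverse_cons, List.reverse_nil, List.nil_append, List.cons_append,
          List.append_assoc]
        rw [← h, hp, hG]
        simp only [List.map_append, List.map_map, List.append_assoc, eA, Function.comp,
          List.cons_append, List.reverse_cons, List.reverse_append, List.reverse_nil,
          List.nil_append]
        exact hih
      · -- cannot split
        have hG : innerA colors (u + 1) (v - 1) (q.length : Int) = [u + v] := by
          unfold innerA; rw [if_neg (by omega)]; congr 1; ring
        have hp : partsB (mp + 1) (u + v) (u + 1) = [[u + v]] := by
          unfold partsB; rw [if_neg (by omega), if_neg (by omega)]
        simp only [restR, hG, List.length_reverse, List.reverse_reverse, List.reverse_append,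
          List.reverse_cons, List.reverse_nil, List.nil_append]
        rw [← h, hp]
        simp

lemma loopA_singleton (colors : Int) (fuel : Nat) (a : Int) : loopA colors fuel [a] = [] := by
  cases fuel <;> simp [loopA]

lemma loopA_eq (colors : Int) :
    ∀ (fuel : Nat) (t : List Int) (u v : Int),
    (restR colors (v :: u :: t)).length ≤ fuel →
    loopA colors fuel (t.reverse ++ [u, v]) = restR colors (v :: u :: t) := by
  intro fuel
  induction fuel with
  | zero =>
    intro t u v hle
    exfalso
    have hne := partsB_ne_nil (colors - t.length).toNat (u + v) (u + 1)
    have hpos := List.length_pos_of_ne_nil hne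
    simp only [restR, List.length_append, List.length_map] at hle
    omega
  | succ fuel ihf =>
    intro t u v hle
    have hsplit : t.reverse ++ [u, v] = (t.reverse ++ [u]) ++ [v] := by simp
    have hq : (t.reverse ++ [u, v]).dropLast.dropLast = t.reverse := by
      rw [hsplit]; simp
    have hu : (t.reverse ++ [u, v]).dropLast.getLastD 0 = u := by
      rw [hsplit]; simp
    have hv : (t.reverse ++ [u, v]).getLastD 0 = v := by
      rw [hsplit]; simp
    have hst := step_eq colors (colors - t.length).toNat t.reverse u v (by simp)
    simp only [List.reverse_reverse, List.length_reverse] at hst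
    simp only [loopA]
    rw [if_neg (by simp), hq, hu, hv]
    simp only [List.length_reverse]
    rw [hst]
    set s' := t.reverse ++ innerA colors (u + 1) (v - 1) (t.length : Int) with hs'
    have hsne : s' ≠ [] := by
      intro hc
      exact innerA_ne_nil colors (u + 1) (v - 1) (t.length : Int) (List.append_eq_nil_iff.mp hc).2
    congr 1
    rcases hrev : s'.reverse with _ | ⟨a, _ | ⟨b, t2⟩⟩
    · exact absurd (by simpa using congrArg List.reverse hrev) hsne
    · have : s' = [a] := by simpa using congrArg List.reverse hrev
      rw [this, loopA_singleton]
      simp [restR]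
    · have hs2 : s' = t2.reverse ++ [b, a] := by
        have := congrArg List.reverse hrev
        simpa using this
      rw [hs2]
      apply ihf
      have : (restR colors (v :: u :: t)).length ≤ fuel + 1 := hle
      rw [hst, hrev] at this
      simpa using this

-- ===== VERDICT (by name: the statement is the Claim_ definition above) =====
theorem generate_subproblems_spec : Claim_equal_generate_subproblems := by
  intro n colors _ hpre
  unfold Pre_generate_subproblems at hpre
  show generate_subproblems n colors = generate_subproblems_alt n colors
  unfold generate_subproblems
  have h0 : ([0, n] : List Int) = ([] : List Int).reverse ++ [0, n] := by simp
  have hbound : (restR colors (n :: 0 :: [])).length ≤ 2 ^ n.toNat + 2 := by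
    have h1 := partsB_len colors.toNat n 1 (by norm_num)
    have h2 : (2 : Nat) ^ (n + 1 - 2 * 1).toNat ≤ 2 ^ n.toNat :=
      Nat.pow_le_pow_right (by norm_num) (by omega)
    have h3 : restR colors [n] = [] := by simp [restR]
    simp only [restR, List.length_append, List.length_map, List.length_nil, Nat.cast_zero,
      Int.sub_zero, Int.zero_add, h3]
    omega
  rw [h0, loopA_eq colors _ [] 0 n hbound]
  simp only [restR, List.length_nil, Nat.cast_zero, List.reverse_nil, List.nil_append,
    Int.sub_zero, Int.zero_add]
  unfold generate_subproblems_alt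
  norm_num [restR]
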